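-- pv_equiv track=rewrite | github.com/fluidinfo/fluiddb | fluiddb/data/path.py | getPathHierarchy
-- ===== SOURCE A (Python) =====
-- def getParentPath(path):
--     """Get the parent path from C{path}.
--
--     @param path: A fully-qualified C{unicode} path.
--     @return: The C{unicode} parent path or C{None} if C{path} represents a
--         root-level entity.
--     """
--     unpackedPath = path.rsplit(u'/', 1)
--     return None if len(unpackedPath) == 1 else unpackedPath[0]
--
-- def getPathHierarchy(paths):
--         """
--         Get the given paths plus all the parents for each path up to the root
--         namespace.
--         """
--         hierarchy = set()
--         for path in paths:
--             hierarchy.add(path)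
--             parent = getParentPath(path)
--             while parent is not None:
--                 hierarchy.add(parent)
--                 parent = getParentPath(parent)
--         return hierarchy
-- ===== SOURCE B (Python) =====
-- def getPathHierarchy(paths):
--     """
--     Get the given paths plus all the parents for each path up to the root
--     namespace.
--     """
--     hierarchy = set()
--     for path in paths:
--         hierarchy.add(path)
--         for i in range(len(path) - 1, -1, -1):
--             if path[i] == u'/':
--                 hierarchy.add(path[:i])
--     return hierarchy
-- ===== Notes on version B (the rewrite author's own statement) =====
-- stated objective: alternative
-- what changed: Replaces the repeated rsplit walk-up (getParentPath called on each successive parent string) by a single reverse index scan over each path that slices off a prefix at every '/' it meets; getParentPath is not used at all.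
import Mathlib
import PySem

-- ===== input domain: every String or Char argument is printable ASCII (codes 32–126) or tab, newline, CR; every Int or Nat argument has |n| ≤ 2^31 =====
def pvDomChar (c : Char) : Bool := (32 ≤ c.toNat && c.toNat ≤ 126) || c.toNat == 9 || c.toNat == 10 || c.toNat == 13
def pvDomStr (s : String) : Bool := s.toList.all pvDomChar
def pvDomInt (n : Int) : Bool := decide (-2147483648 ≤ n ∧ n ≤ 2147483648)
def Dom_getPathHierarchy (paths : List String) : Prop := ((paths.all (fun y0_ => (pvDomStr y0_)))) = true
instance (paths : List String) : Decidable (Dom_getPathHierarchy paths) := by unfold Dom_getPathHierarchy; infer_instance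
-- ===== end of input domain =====

-- B replaces A's repeated rsplit walk-up (getParentPath per level) by a single reverse index scan
-- per path that slices a prefix at each '/'; same returned set, proved equal below. (objective: alternative)

-- ===== PORT A =====
-- getParentPath's 'path.rsplit(u'/', 1)' on chars: the prefix before the LAST '/', none when the
-- path contains no '/' (rsplit's length-1 case). Hand port, exact for the single-char separator.
def getParentPath? : List Char → Option (List Char)
  | [] => none
  | c :: rest =>
    match getParentPath? rest with
    | some p => some (c :: p)
    | none => if c = '/' then some [] else none

-- the parent is a proper prefix (termination measure for the while loop below)
theorem getParentPath?_length : ∀ {cs p : List Char}, getParentPath? cs = some p → p.length < cs.length := by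
  intro cs
  induction cs with
  | nil => intro p h; simp [getParentPath?] at h
  | cons c rest ih =>
    intro p h
    simp only [getParentPath?] at h
    cases hr : getParentPath? rest with
    | some q =>
      rw [hr] at h
      cases h
      have := ih hr
      simp; omega
    | none =>
      rw [hr] at h
      by_cases hc : c = '/'
      · simp [hc] at h; cases h; simp
      · simp [hc] at h

-- A's 'while parent is not None' loop
def pvWalk (h : PySem.Set String) (parent : Option (List Char)) : PySem.Set String :=
  match parent with
  | none => h
  | some p => pvWalk (PySem.Set.add h (String.ofList p)) (getParentPath? p)
termination_by parent.elim 0 (fun p => p.length + 1)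
decreasing_by
  cases hq : getParentPath? p with
  | none => simp
  | some q => simpa using getParentPath?_length hq

def getPathHierarchy (paths : List String) : List String :=
  paths.foldl
    (fun h path => pvWalk (PySem.Set.add h path) (getParentPath? path.toList))
    PySem.Set.empty

-- ===== PORT B =====
def getPathHierarchy_alt (paths : List String) : List String :=
  paths.foldl
    (fun h path =>
      let cs := path.toList
      (PySem.List.pyRange ((cs.length : Int) - 1) (-1) (-1)).foldl
        (fun h i =>
          if PySem.List.pyGetD cs i ' ' = '/' then
            PySem.Set.add h (String.ofList (PySem.List.slice cs none (some i)))
          else h)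
        (PySem.Set.add h path))
    PySem.Set.empty

-- ===== PRECONDITION & SPEC =====
def Spec_getPathHierarchy (paths : List String) (out : List String) : Prop := out = getPathHierarchy_alt paths
instance (paths : List String) (out : List String) : Decidable (Spec_getPathHierarchy paths out) := by unfold Spec_getPathHierarchy; infer_instance

-- ===== CLAIM (what is proved, stated in full; the proofs are below) =====
def Claim_equal_getPathHierarchy : Prop := ∀ (paths : List String), Dom_getPathHierarchy paths → Spec_getPathHierarchy paths (getPathHierarchy paths)

-- ===== LEMMAS AND PROOFS =====

-- index of the last '/' in a char list
def lastSlash? : List Char → Option Nat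
  | [] => none
  | c :: rest =>
    match lastSlash? rest with
    | some i => some (i + 1)
    | none => if c = '/' then some 0 else none

theorem getParentPath?_eq_lastSlash (cs : List Char) :
    getParentPath? cs = (lastSlash? cs).map cs.take := by
  induction cs with
  | nil => rfl
  | cons c rest ih =>
    simp only [getParentPath?, lastSlash?, ih]
    cases lastSlash? rest with
    | some i => simp [List.take_succ_cons]
    | none => by_cases hc : c = '/' <;> simp [hc]

theorem lastSlash?_lt : ∀ {cs : List Char} {i : Nat}, lastSlash? cs = some i → i < cs.length := by
  intro cs
  induction cs with
  | nil => intro i h; simp [lastSlash?] at h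
  | cons c rest ih =>
    intro i h
    simp only [lastSlash?] at h
    cases hr : lastSlash? rest with
    | some j => rw [hr] at h; cases h; have := ih hr; simp; omega
    | none =>
      rw [hr] at h
      by_cases hc : c = '/'
      · rw [if_pos hc] at h; cases h; simp
      · rw [if_neg hc] at h; cases h

theorem lastSlash?_snoc (p : List Char) (c : Char) :
    lastSlash? (p ++ [c]) = if c = '/' then some p.length else lastSlash? p := by
  induction p with
  | nil => by_cases hc : c = '/' <;> simp [lastSlash?, hc]
  | cons d rest ih =>
    simp only [List.cons_append, lastSlash?, ih]
    by_cases hc : c = '/'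
    · simp [hc]
    · simp only [hc, if_false]

-- per-path core: B's reverse scan over the first j characters = A's walk-up from cs.take j
theorem walk_eq (cs : List Char) :
    ∀ (j : Nat), j ≤ cs.length → ∀ (h : PySem.Set String),
      (PySem.List.pyRange ((j : Int) - 1) (-1) (-1)).foldl
        (fun h i =>
          if PySem.List.pyGetD cs i ' ' = '/' then
            PySem.Set.add h (String.ofList (PySem.List.slice cs none (some i)))
          else h) h
      = pvWalk h (getParentPath? (cs.take j)) := by
  intro j
  induction j with
  | zero =>
    intro _ h
    rw [PySem.List.pyRange_neg_one_eq_nil (by norm_num)]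
    simp [getParentPath?, pvWalk]
  | succ j ih =>
    intro hj h
    have hjlen : j < cs.length := by omega
    have hcons : PySem.List.pyRange ((↑(j + 1) : Int) - 1) (-1) (-1)
        = ((j : Int)) :: PySem.List.pyRange ((j : Int) - 1) (-1) (-1) := by
      rw [PySem.List.pyRange_neg_one_cons (by push_cast; omega)]
      norm_num
    rw [hcons, List.foldl_cons]
    have hget : PySem.List.pyGetD cs ((j : Int)) ' ' = cs[j] := by
      rw [PySem.List.pyGetD_natCast]
      exact List.getD_eq_getElem cs ' ' hjlen
    have htake : cs.take (j + 1) = cs.take j ++ [cs[j]] := by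
      rw [List.take_add_one, List.getElem?_eq_getElem hjlen]
      rfl
    have hslice : PySem.List.slice cs none (some ((j : Int))) = cs.take j := by
      rw [PySem.List.slice_to cs (Int.natCast_nonneg j)]
      simp
    have hlenj : (cs.take j).length = j := by simp [List.length_take]; omega
    by_cases hc : cs[j] = '/'
    · rw [hget, if_pos hc, hslice, ih (by omega)]
      have hpar : getParentPath? (cs.take (j + 1)) = some (cs.take j) := by
        rw [getParentPath?_eq_lastSlash, htake, lastSlash?_snoc, if_pos hc, hlenj]
        simp only [Option.map_some]
        congr 1
        rw [List.take_append_of_le_length (by omega)]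
        rw [List.take_take]
        simp
      rw [hpar]
      conv_rhs => rw [pvWalk]
    · rw [hget, if_neg hc, ih (by omega)]
      have hpar : getParentPath? (cs.take (j + 1)) = getParentPath? (cs.take j) := by
        rw [getParentPath?_eq_lastSlash, getParentPath?_eq_lastSlash, htake, lastSlash?_snoc, if_neg hc]
        cases hls : lastSlash? (cs.take j) with
        | none => simp
        | some i =>
          have hi : i < (cs.take j).length := lastSlash?_lt hls
          simp only [Option.map_some]
          congr 1
          rw [List.take_append_of_le_length (le_of_lt hi)]
      rw [hpar]

theorem getPathHierarchy_eq_alt (paths : List String) :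
    getPathHierarchy paths = getPathHierarchy_alt paths := by
  unfold getPathHierarchy getPathHierarchy_alt
  have hf : (fun (h : PySem.Set String) (path : String) =>
        pvWalk (PySem.Set.add h path) (getParentPath? path.toList))
      = (fun (h : PySem.Set String) (path : String) =>
        let cs := path.toList
        (PySem.List.pyRange ((cs.length : Int) - 1) (-1) (-1)).foldl
          (fun h i =>
            if PySem.List.pyGetD cs i ' ' = '/' then
              PySem.Set.add h (String.ofList (PySem.List.slice cs none (some i)))
            else h)
          (PySem.Set.add h path)) := by
    funext h path
    have := walk_eq path.toList path.toList.length (le_refl _) (PySem.Set.add h path)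
    rw [List.take_length] at this
    exact this.symm
  rw [hf]

-- ===== VERDICT (by name: the statement is the Claim_ definition above) =====
theorem getPathHierarchy_spec : Claim_equal_getPathHierarchy := by
  intro paths _
  unfold Spec_getPathHierarchy
  exact getPathHierarchy_eq_alt paths
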